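-- pv_equiv track=rewrite | github.com/ehsanaghaei/DodgeTron | read_data.py | find_repeated_patterns_
-- ===== SOURCE A (Python) =====
-- def z_algorithm(lst):
--     n = len(lst)
--     z = [0] * n
--     l, r = 0, 0
--     for i in range(1, n):
--         if i <= r:
--             z[i] = min(r - i + 1, z[i - l])
--         while i + z[i] < n and lst[z[i]] == lst[i + z[i]]:
--             z[i] += 1
--         if i + z[i] - 1 > r:
--             l, r = i, i + z[i] - 1
--     return z
--
-- def find_repeated_patterns_(lst, n):
--     patterns = set()
--     for i in range(len(lst) - n + 1):
--         sublst = lst[i:i + n]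
--         z = z_algorithm(sublst)
--         for j in range(len(z)):
--             if z[j] > 0 and j + z[j] == len(z):
--                 pattern = tuple(sublst[j:j + z[j]])
--                 patterns.add(pattern)
--     return patterns
-- ===== SOURCE B (Python) =====
-- def find_repeated_patterns_(lst, n):
--     # Direct border check per window: a pattern is added iff it is a proper
--     # border (prefix == suffix) of the window, longest first.
--     patterns = set()
--     for i in range(len(lst) - n + 1):
--         w = lst[i:i + n]
--         m = len(w)
--         for k in range(m - 1, 0, -1):
--             if w[:k] == w[m - k:]:
--                 patterns.add(tuple(w[:k]))
--     return patterns
-- ===== Notes on version B (the rewrite author's own statement) =====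
-- stated objective: simpler
-- what changed: Replaces the Z-algorithm scan per window by a direct prefix/suffix (border) comparison for each candidate length, eliminating the z-array computation entirely.
import Mathlib
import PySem

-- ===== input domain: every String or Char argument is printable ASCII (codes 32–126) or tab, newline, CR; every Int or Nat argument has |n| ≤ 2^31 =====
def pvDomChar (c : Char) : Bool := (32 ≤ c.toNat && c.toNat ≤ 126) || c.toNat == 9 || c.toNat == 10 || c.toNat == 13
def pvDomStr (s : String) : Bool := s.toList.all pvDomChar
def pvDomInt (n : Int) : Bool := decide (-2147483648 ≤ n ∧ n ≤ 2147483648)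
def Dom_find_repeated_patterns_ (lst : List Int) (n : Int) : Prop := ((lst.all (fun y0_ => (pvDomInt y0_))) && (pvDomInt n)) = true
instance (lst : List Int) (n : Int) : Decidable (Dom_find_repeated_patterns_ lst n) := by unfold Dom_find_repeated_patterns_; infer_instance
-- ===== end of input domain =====

-- B replaces A's per-window Z-algorithm scan by a direct prefix/suffix comparison for each
-- candidate border length (simpler, no z-array); same returned set, proved equal.

-- ===== PORT A =====
-- inner 'while i + z[i] < n and lst[z[i]] == lst[i + z[i]]: z[i] += 1' of z_algorithm
def zwhileA (w : List Int) (i zi : Nat) : Nat :=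
  if i + zi < w.length ∧ w.getD zi 0 = w.getD (i + zi) 0 then zwhileA w i (zi + 1) else zi
termination_by w.length - (i + zi)
decreasing_by omega

-- one iteration of z_algorithm's for-loop; state (z, l, r)
def zstepA (w : List Int) (st : List Nat × Nat × Nat) (i : Nat) : List Nat × Nat × Nat :=
  let z := st.1
  let l := st.2.1
  let r := st.2.2
  let z1 := if i ≤ r then z.set i (min (r - i + 1) (z.getD (i - l) 0)) else z
  let zi := zwhileA w i (z1.getD i 0)
  let z2 := z1.set i zi
  if r < i + zi - 1 then (z2, i, i + zi - 1) else (z2, l, r)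

def z_algorithm (w : List Int) : List Nat :=
  ((List.range' 1 (w.length - 1)).foldl (zstepA w) (List.replicate w.length 0, 0, 0)).1

def find_repeated_patterns_ (lst : List Int) (n : Int) : List (List Int) :=
  (PySem.List.pyRange 0 ((lst.length : Int) - n + 1) 1).foldl
    (fun patterns i =>
      let sublst := PySem.List.slice lst (some i) (some (i + n))
      let z := z_algorithm sublst
      (List.range z.length).foldl
        (fun patterns j =>
          if 0 < z.getD j 0 ∧ j + z.getD j 0 = z.length then
            PySem.Set.add patterns
              (PySem.List.slice sublst (some (j : Int)) (some ((j : Int) + (z.getD j 0 : Int))))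
          else patterns)
        patterns)
    PySem.Set.empty

-- ===== PORT B =====
def find_repeated_patterns__alt (lst : List Int) (n : Int) : List (List Int) :=
  (PySem.List.pyRange 0 ((lst.length : Int) - n + 1) 1).foldl
    (fun patterns i =>
      let w := PySem.List.slice lst (some i) (some (i + n))
      let m := w.length
      (PySem.List.pyRange ((m : Int) - 1) 0 (-1)).foldl
        (fun patterns k =>
          if PySem.List.slice w none (some k) = PySem.List.slice w (some ((m : Int) - k)) none then
            PySem.Set.add patterns (PySem.List.slice w none (some k))
          else patterns)
        patterns)
    PySem.Set.empty

-- ===== PRECONDITION & SPEC =====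
def Spec_find_repeated_patterns_ (lst : List Int) (n : Int) (out : List (List Int)) : Prop := out = find_repeated_patterns__alt lst n
instance (lst : List Int) (n : Int) (out : List (List Int)) : Decidable (Spec_find_repeated_patterns_ lst n out) := by unfold Spec_find_repeated_patterns_; infer_instance

-- ===== CLAIM (what is proved, stated in full; the proofs are below) =====
def Claim_equal_find_repeated_patterns_ : Prop := ∀ (lst : List Int) (n : Int), Dom_find_repeated_patterns_ lst n → Spec_find_repeated_patterns_ lst n (find_repeated_patterns_ lst n)

-- ===== LEMMAS AND PROOFS =====

-- length of the longest common prefix of two lists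
def lcp : List Int → List Int → Nat
  | a :: as, b :: bs => if a = b then lcp as bs + 1 else 0
  | _, _ => 0

theorem lcp_le_right : ∀ a b : List Int, lcp a b ≤ b.length := by
  intro a
  induction a with
  | nil => intro b; cases b <;> simp [lcp]
  | cons x as ih =>
    intro b
    cases b with
    | nil => simp [lcp]
    | cons y bs =>
      simp only [lcp]
      split
      · simpa using ih bs
      · simp

theorem lcp_agree : ∀ (a b : List Int) (t : Nat), t < lcp a b → a.getD t 0 = b.getD t 0 := by
  intro a
  induction a with
  | nil => intro b t h; cases b <;> simp [lcp] at h
  | cons x as ih =>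
    intro b t h
    cases b with
    | nil => simp [lcp] at h
    | cons y bs =>
      simp only [lcp] at h
      by_cases hxy : x = y
      · simp only [if_pos hxy] at h
        cases t with
        | zero => simpa using hxy
        | succ t' => simpa [List.getD] using ih bs t' (by omega)
      · simp [hxy] at h

theorem lcp_ge : ∀ (a b : List Int) (s : Nat), s ≤ a.length → s ≤ b.length →
    (∀ t, t < s → a.getD t 0 = b.getD t 0) → s ≤ lcp a b := by
  intro a
  induction a with
  | nil => intro b s ha _ _; simp at ha; omega
  | cons x as ih =>
    intro b s ha hb hag
    cases s with
    | zero => omega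
    | succ s' =>
      cases b with
      | nil => simp at hb
      | cons y bs =>
        have hxy : x = y := by simpa [List.getD] using hag 0 (by omega)
        simp only [lcp, if_pos hxy]
        have := ih bs s' (by simpa using ha) (by simpa using hb)
          (fun t ht => by simpa [List.getD] using hag (t + 1) (by omega))
        omega

-- lcp a b = b.length exactly when b is a prefix of a (as take)
-- lcp a b = b.length exactly when b is a prefix of a (as take)
theorem lcp_eq_len_iff : ∀ a b : List Int, lcp a b = b.length ↔ a.take b.length = b := by
  intro a
  induction a with
  | nil =>
    intro b
    cases b with
    | nil => simp [lcp]
    | cons y bs => simp [lcp]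
  | cons x as ih =>
    intro b
    cases b with
    | nil => simp [lcp]
    | cons y bs =>
      by_cases hxy : x = y
      · subst hxy
        simp only [lcp, if_true, List.length_cons, List.take_succ_cons, List.cons.injEq,
          true_and]
        constructor
        · intro h; exact (ih bs).mp (by omega)
        · intro h; have := (ih bs).mpr h; omega
      · simp only [lcp, if_neg hxy, List.length_cons, List.take_succ_cons, List.cons.injEq]
        constructor
        · intro h; exact absurd h (by omega)
        · rintro ⟨h, -⟩; exact absurd h hxy

theorem lcp_drop_getD (w : List Int) (i t : Nat) :
    (w.drop i).getD t 0 = w.getD (i + t) 0 := by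
  simp [List.getD_eq_getElem?_getD, List.getElem?_drop]

-- the while-loop computes exactly lcp w (w.drop i), from any start ≤ that lcp
theorem zwhileA_eq (w : List Int) (i start : Nat) (hstart : start ≤ lcp w (w.drop i)) :
    zwhileA w i start = lcp w (w.drop i) := by
  by_cases hlt : start < lcp w (w.drop i)
  · have hi : i + start < w.length := by
      have := lcp_le_right w (w.drop i)
      simp only [List.length_drop] at this
      omega
    have heq : w.getD start 0 = w.getD (i + start) 0 := by
      have := lcp_agree w (w.drop i) start hlt
      rwa [lcp_drop_getD] at this
    rw [zwhileA, if_pos ⟨hi, heq⟩]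
    exact zwhileA_eq w i (start + 1) (by omega)
  · have hse : start = lcp w (w.drop i) := by omega
    rw [zwhileA, if_neg, hse]
    rintro ⟨h1, h2⟩
    have : start + 1 ≤ lcp w (w.drop i) := by
      apply lcp_ge
      · omega
      · simp only [List.length_drop]; omega
      · intro t ht
        rw [lcp_drop_getD]
        rcases Nat.lt_or_ge t start with h | h
        · have := lcp_agree w (w.drop i) t (by omega)
          rwa [lcp_drop_getD] at this
        · have : t = start := by omega
          subst this
          exact h2
    omega
termination_by lcp w (w.drop i) - start

-- invariant of z_algorithm's loop before processing index c
def ZInv (w : List Int) (c : Nat) (st : List Nat × Nat × Nat) : Prop :=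
  st.1.length = w.length ∧
  (∀ j, 1 ≤ j → j < c → st.1.getD j 0 = lcp w (w.drop j)) ∧
  (∀ j, j < st.1.length → (j = 0 ∨ c ≤ j) → st.1.getD j 0 = 0) ∧
  st.2.1 < c ∧
  (∀ t, st.2.1 + t ≤ st.2.2 → w.getD (st.2.1 + t) 0 = w.getD t 0) ∧
  st.2.2 < w.length

theorem zstepA_inv (w : List Int) (st : List Nat × Nat × Nat) (i : Nat)
    (hi1 : 1 ≤ i) (hi2 : i < w.length) (hinv : ZInv w i st) :
    ZInv w (i + 1) (zstepA w st i) := by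
  obtain ⟨hlen, hproc, hunproc, hl, hmatch, hr⟩ := hinv
  set m := w.length with hm
  set z := st.1 with hz
  set l := st.2.1 with hlv
  set r := st.2.2 with hrv
  -- the start value is ≤ lcp w (w.drop i)
  set z1 := if i ≤ r then z.set i (min (r - i + 1) (z.getD (i - l) 0)) else z with hz1
  have hz1len : z1.length = m := by
    rw [hz1]; split <;> simp [hlen]
  have hz1j : ∀ j, j ≠ i → z1.getD j 0 = z.getD j 0 := by
    intro j hj
    rw [hz1]
    split
    · simp [List.getD_eq_getElem?_getD, List.getElem?_set_ne (fun h => hj h.symm)]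
    · rfl
  have hstart : z1.getD i 0 ≤ lcp w (w.drop i) := by
    rw [hz1]
    by_cases hir : i ≤ r
    · simp only [if_pos hir]
      have hiset : (z.set i (min (r - i + 1) (z.getD (i - l) 0))).getD i 0
          = min (r - i + 1) (z.getD (i - l) 0) := by
        simp [List.getD_eq_getElem?_getD, List.getElem?_set_self (by omega : i < z.length)]
      rw [hiset]
      set k := i - l with hk
      set s := min (r - i + 1) (z.getD k 0) with hs
      by_cases hk1 : 1 ≤ k ∧ k < i
      · have hzk : z.getD k 0 = lcp w (w.drop k) := hproc k hk1.1 hk1.2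
        apply lcp_ge
        · omega
        · simp; omega
        · intro t ht
          rw [lcp_drop_getD]
          have ht1 : t < r - i + 1 := by omega
          have ht2 : t < z.getD k 0 := by omega
          rw [hzk] at ht2
          have hkt : w.getD t 0 = w.getD (k + t) 0 := by
            have := lcp_agree w (w.drop k) t ht2
            rwa [lcp_drop_getD] at this
          have hit : w.getD (l + (k + t)) 0 = w.getD (k + t) 0 := hmatch (k + t) (by omega)
          have : l + (k + t) = i + t := by omega
          rw [this] at hit
          rw [hkt, hit]
      · -- k = 0 impossible (l < i); k ≥ i means k unprocessed hence z[k] = 0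
        have hk0 : k = i := by omega
        have hzk0 : z.getD k 0 = 0 := hunproc k (by omega) (by omega)
        rw [hs, hzk0]
        simp
    · simp only [if_neg hir]
      have hzi0 : z.getD i 0 = 0 := hunproc i (by omega) (by omega)
      rw [hzi0]
      exact Nat.zero_le _
  set zi := zwhileA w i (z1.getD i 0) with hzi
  have hziv : zi = lcp w (w.drop i) := zwhileA_eq w i _ hstart
  have hzile : zi ≤ m - i := by
    rw [hziv]
    have := lcp_le_right w (w.drop i)
    simpa using this
  set z2 := z1.set i zi with hz2
  have hz2len : z2.length = m := by simp [hz2, hz1len]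
  have hz2i : z2.getD i 0 = zi := by
    simp [hz2, List.getD_eq_getElem?_getD, List.getElem?_set_self (by omega : i < z1.length)]
  have hz2j : ∀ j, j ≠ i → z2.getD j 0 = z.getD j 0 := by
    intro j hj
    rw [hz2]
    rw [List.getD_eq_getElem?_getD, List.getElem?_set_ne (fun h => hj h.symm),
      ← List.getD_eq_getElem?_getD]
    exact hz1j j hj
  have hres : zstepA w st i =
      if r < i + zi - 1 then (z2, i, i + zi - 1) else (z2, l, r) := by
    simp only [zstepA, ← hz, ← hlv, ← hrv, ← hz1, ← hzi, ← hz2]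
  rw [hres]
  have hcommon : z2.length = w.length ∧
      (∀ j, 1 ≤ j → j < i + 1 → z2.getD j 0 = lcp w (w.drop j)) ∧
      (∀ j, j < z2.length → (j = 0 ∨ i + 1 ≤ j) → z2.getD j 0 = 0) := by
    refine ⟨hz2len, ?_, ?_⟩
    · intro j hj1 hj2
      by_cases hji : j = i
      · subst hji; rw [hz2i, hziv]
      · rw [hz2j j hji]; exact hproc j hj1 (by omega)
    · intro j hjlt hj
      have hji : j ≠ i := by omega
      rw [hz2j j hji]
      exact hunproc j (by rw [hz2len, ← hlen] at hjlt; exact hjlt) (by omega)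
  split
  · refine ⟨hcommon.1, hcommon.2.1, hcommon.2.2, by show i < i + 1; omega, ?_,
      by show i + zi - 1 < w.length; omega⟩
    intro t ht
    have ht2 : i + t ≤ i + zi - 1 := ht
    show w.getD (i + t) 0 = w.getD t 0
    have htzi : t < zi := by omega
    rw [hziv] at htzi
    have := lcp_agree w (w.drop i) t htzi
    rw [lcp_drop_getD] at this
    exact this.symm
  · exact ⟨hcommon.1, hcommon.2.1, hcommon.2.2, by show l < i + 1; omega,
      (by intro t ht; exact hmatch t ht), by show r < w.length; exact hr⟩

theorem zfold_inv (w : List Int) :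
    ∀ (cnt c : Nat) (st : List Nat × Nat × Nat), 1 ≤ c → c + cnt ≤ w.length →
      ZInv w c st → ZInv w (c + cnt) ((List.range' c cnt).foldl (zstepA w) st) := by
  intro cnt
  induction cnt with
  | zero => intro c st _ _ h; simpa using h
  | succ k ih =>
    intro c st hc hle h
    rw [List.range'_succ, List.foldl_cons]
    have := ih (c + 1) (zstepA w st c) (by omega) (by omega)
      (zstepA_inv w st c hc (by omega) h)
    simpa [Nat.add_assoc, Nat.add_comm 1 k] using this

theorem z_algorithm_correct (w : List Int) (hw : 1 ≤ w.length) :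
    (z_algorithm w).length = w.length ∧
    (∀ j, 1 ≤ j → j < w.length → (z_algorithm w).getD j 0 = lcp w (w.drop j)) ∧
    (z_algorithm w).getD 0 0 = 0 := by
  have hinit : ZInv w 1 (List.replicate w.length 0, 0, 0) := by
    refine ⟨by simp, ?_, ?_, ?_, ?_, ?_⟩
    · intro j hj1 hj2; omega
    · intro j hj _
      have hjl : j < w.length := by simpa using hj
      simp [List.getD_eq_getElem?_getD, List.getElem?_replicate, hjl]
    · show (0 : Nat) < 1; omega
    · intro t ht
      show w.getD (0 + t) 0 = w.getD t 0
      simp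
    · show (0 : Nat) < w.length; omega
  have := zfold_inv w (w.length - 1) 1 _ (by omega) (by omega) hinit
  have hfin : ZInv w w.length ((List.range' 1 (w.length - 1)).foldl (zstepA w)
      (List.replicate w.length 0, 0, 0)) := by
    have h1 : 1 + (w.length - 1) = w.length := by omega
    rwa [h1] at this
  obtain ⟨hlen, hproc, hunproc, _, _, _⟩ := hfin
  refine ⟨hlen, hproc, ?_⟩
  by_cases h0 : 0 < w.length
  · exact hunproc 0 (by omega) (Or.inl rfl)
  · omega

-- the canonical per-window fold both inner loops reduce to
def borderStep (w : List Int) (s : PySem.Set (List Int)) (j : Nat) : PySem.Set (List Int) :=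
  if w.take (w.length - j) = w.drop j then PySem.Set.add s (w.drop j) else s

theorem innerA_eq_canon (w : List Int) (s : PySem.Set (List Int)) :
    (List.range (z_algorithm w).length).foldl
        (fun patterns j =>
          if 0 < (z_algorithm w).getD j 0 ∧ j + (z_algorithm w).getD j 0 = (z_algorithm w).length then
            PySem.Set.add patterns
              (PySem.List.slice w (some (j : Int)) (some ((j : Int) + ((z_algorithm w).getD j 0 : Int))))
          else patterns) s
      = (List.range' 1 (w.length - 1)).foldl (borderStep w) s := by
  rcases Nat.eq_zero_or_pos w.length with hw | hw
  · have hw0 : w = [] := List.length_eq_zero_iff.mp hw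
    subst hw0
    rfl
  · obtain ⟨hlen, hproc, h0⟩ := z_algorithm_correct w hw
    have hrange : List.range w.length = 0 :: List.range' 1 (w.length - 1) := by
      rw [List.range_eq_range']
      have h1 : w.length = (w.length - 1) + 1 := by omega
      rw [h1, List.range'_succ]
      simp
    rw [hlen, hrange, List.foldl_cons, if_neg (by rw [h0]; omega)]
    apply PySem.List.foldl_congr_mem
    intro acc j hj
    rw [List.mem_range'_1] at hj
    have hj2 : j < w.length := by omega
    rw [hproc j hj.1 hj2]
    have key : lcp w (w.drop j) = w.length - j ↔ w.take (w.length - j) = w.drop j := by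
      have h := lcp_eq_len_iff w (w.drop j)
      rwa [List.length_drop] at h
    unfold borderStep
    by_cases hc : w.take (w.length - j) = w.drop j
    · have hL : lcp w (w.drop j) = w.length - j := key.mpr hc
      rw [if_pos (by constructor <;> omega), if_pos hc]
      congr 1
      rw [PySem.List.slice_natCast_add, hL]
      exact List.take_of_length_le (by simp)
    · rw [if_neg, if_neg hc]
      rintro ⟨hpos, hsum⟩
      exact hc (key.mp (by omega))

theorem innerB_eq_canon (w : List Int) (s : PySem.Set (List Int)) :
    (PySem.List.pyRange ((w.length : Int) - 1) 0 (-1)).foldl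
        (fun patterns k =>
          if PySem.List.slice w none (some k) = PySem.List.slice w (some ((w.length : Int) - k)) none then
            PySem.Set.add patterns (PySem.List.slice w none (some k))
          else patterns) s
      = (List.range' 1 (w.length - 1)).foldl (borderStep w) s := by
  rcases Nat.eq_zero_or_pos w.length with hw | hw
  · rw [PySem.List.pyRange_neg_one_eq_nil (by omega)]
    simp [hw]
  · rw [PySem.List.pyRange_neg_one, List.foldl_map]
    have hto : (((w.length : Int) - 1) - 0).toNat = w.length - 1 := by omega
    rw [hto]
    rw [List.range'_eq_map_range (s := 1) (n := w.length - 1), List.foldl_map]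
    apply PySem.List.foldl_congr_mem
    intro acc t ht
    rw [List.mem_range] at ht
    have e1 : PySem.List.slice w none (some ((w.length : Int) - 1 - (t : Int)))
        = w.take (w.length - 1 - t) := by
      have hk1 : (w.length : Int) - 1 - (t : Int) = ((w.length - 1 - t : Nat) : Int) := by omega
      rw [hk1, PySem.List.slice_to_natCast]
    have e2 : PySem.List.slice w (some ((w.length : Int) - ((w.length : Int) - 1 - (t : Int)))) none
        = w.drop (1 + t) := by
      have hk2 : (w.length : Int) - ((w.length : Int) - 1 - (t : Int)) = ((1 + t : Nat) : Int) := by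
        omega
      rw [hk2, PySem.List.slice_from_natCast]
    rw [e1, e2]
    unfold borderStep
    have hlen : w.length - (1 + t) = w.length - 1 - t := by omega
    rw [hlen]
    split_ifs with h
    · rw [h]
    · rfl

theorem inner_eq (w : List Int) (s : PySem.Set (List Int)) :
    (List.range (z_algorithm w).length).foldl
        (fun patterns j =>
          if 0 < (z_algorithm w).getD j 0 ∧ j + (z_algorithm w).getD j 0 = (z_algorithm w).length then
            PySem.Set.add patterns
              (PySem.List.slice w (some (j : Int)) (some ((j : Int) + ((z_algorithm w).getD j 0 : Int))))
          else patterns) s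
      = (PySem.List.pyRange ((w.length : Int) - 1) 0 (-1)).foldl
        (fun patterns k =>
          if PySem.List.slice w none (some k) = PySem.List.slice w (some ((w.length : Int) - k)) none then
            PySem.Set.add patterns (PySem.List.slice w none (some k))
          else patterns) s := by
  rw [innerA_eq_canon, innerB_eq_canon]

-- ===== VERDICT (by name: the statement is the Claim_ definition above) =====
theorem find_repeated_patterns__spec : Claim_equal_find_repeated_patterns_ := by
  intro lst n _
  unfold Spec_find_repeated_patterns_ find_repeated_patterns_ find_repeated_patterns__alt
  apply PySem.List.foldl_congr_mem
  intro acc i _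
  dsimp only
  exact inner_eq (PySem.List.slice lst (some i) (some (i + n))) acc
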